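-- pv_equiv track=rewrite | github.com/gepd/Deviot | libs/I18n.py | loadTransPair
-- ===== SOURCE A (Python) =====
-- def loadTransPair(block):
--     is_key, key, value = True, '', ''
--     for line in block:
--         index = line.index('"')
--         cur_str = line[index + 1: -1]
--         if line.startswith('msgstr'):
--             is_key = False
--         if is_key:
--             key += cur_str
--         else:
--             value += cur_str
--     return (key, value)
-- ===== SOURCE B (Python) =====
-- def loadTransPair(block):
--     def extract(line):
--         return line[line.index('"') + 1:-1]
--     i = next((k for k, line in enumerate(block) if line.startswith('msgstr')), len(block))
--     key = ''.join(extract(line) for line in block[:i])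
--     value = ''.join(extract(line) for line in block[i:])
--     return (key, value)
-- ===== Notes on version B (the rewrite author's own statement) =====
-- stated objective: simpler
-- what changed: Replaces the stateful mode-flag scan with a find-the-first-msgstr-line split followed by two join-of-extracted-quote passes over the slices.
import Mathlib
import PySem

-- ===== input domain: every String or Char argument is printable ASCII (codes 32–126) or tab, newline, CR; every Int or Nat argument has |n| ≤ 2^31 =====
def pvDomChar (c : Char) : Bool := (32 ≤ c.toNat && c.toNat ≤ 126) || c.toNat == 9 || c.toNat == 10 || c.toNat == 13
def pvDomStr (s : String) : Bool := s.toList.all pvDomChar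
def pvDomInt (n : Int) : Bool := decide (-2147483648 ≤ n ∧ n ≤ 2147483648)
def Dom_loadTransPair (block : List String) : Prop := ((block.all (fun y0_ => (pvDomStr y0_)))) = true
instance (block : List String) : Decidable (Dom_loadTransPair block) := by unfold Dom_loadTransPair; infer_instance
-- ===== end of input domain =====

-- ===== PORT A =====
-- A: one-pass scan with an is_key mode flag flipped at the first 'msgstr' line.
def extractQuoted (line : String) : String :=
  PySem.Str.slice line (some (PySem.Str.find line "\"" + 1)) (some (-1))

def loadTransGo (block : List String) (isKey : Bool) (key value : String) : String × String :=
  match block with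
  | [] => (key, value)
  | line :: rest =>
    let cur := extractQuoted line
    let isKey' := if PySem.Str.startswith line "msgstr" then false else isKey
    if isKey' then loadTransGo rest isKey' (key ++ cur) value
    else loadTransGo rest isKey' key (value ++ cur)

def loadTransPair (block : List String) : String × String :=
  loadTransGo block true "" ""

-- ===== PORT B =====
-- B: find the first 'msgstr' line, split there, join the quoted extracts of each slice.
def extractQuotedB (line : String) : String :=
  PySem.Str.slice line (some (PySem.Str.find line "\"" + 1)) (some (-1))

def loadTransPair_alt (block : List String) : String × String :=
  let i := block.findIdx (fun line => PySem.Str.startswith line "msgstr")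
  (PySem.Str.join "" ((block.take i).map extractQuotedB),
   PySem.Str.join "" ((block.drop i).map extractQuotedB))

-- ===== PRECONDITION & SPEC =====
-- Pre_: every line contains a double quote; on a quote-less line both A and B raise ValueError at line.index('"').
def Pre_loadTransPair (block : List String) : Prop :=
  ∀ line ∈ block, PySem.Str.isIn "\"" line = true
instance (block : List String) : Decidable (Pre_loadTransPair block) := by unfold Pre_loadTransPair; infer_instance
def pvWitness_loadTransPair : List String := ["msgid \"a\"", "msgstr \"b\""]
def Spec_loadTransPair (block : List String) (out : String × String) : Prop := out = loadTransPair_alt block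
instance (block : List String) (out : String × String) : Decidable (Spec_loadTransPair block out) := by unfold Spec_loadTransPair; infer_instance

-- ===== CLAIM (what is proved, stated in full; the proofs are below) =====
def Claim_equal_loadTransPair : Prop := ∀ (block : List String), Dom_loadTransPair block → Pre_loadTransPair block → Spec_loadTransPair block (loadTransPair block)

-- ===== LEMMAS AND PROOFS =====
theorem join_nil_cons (x : String) (xs : List String) :
    PySem.Str.join "" (x :: xs) = x ++ PySem.Str.join "" xs := by
  cases xs <;> simp [PySem.Str.join, PySem.Chars.join_singleton, PySem.Chars.join_cons_cons, PySem.Chars.join_nil]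

theorem join_nil_empty : PySem.Str.join "" ([] : List String) = "" := by
  simp [PySem.Str.join, PySem.Chars.join_nil]

theorem extB_eq : extractQuotedB = extractQuoted := rfl

theorem go_false (block : List String) (key value : String) :
    loadTransGo block false key value
      = (key, value ++ PySem.Str.join "" (block.map extractQuotedB)) := by
  induction block generalizing value with
  | nil => simp [loadTransGo, PySem.Str.join, PySem.Chars.join_nil]
  | cons line rest ih => simp [loadTransGo, ih, join_nil_cons, extB_eq, String.append_assoc]

theorem go_true (block : List String) (key value : String) :
    loadTransGo block true key value
      = (key ++ PySem.Str.join "" ((block.take (block.findIdx (fun line => PySem.Str.startswith line "msgstr"))).map extractQuotedB),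
         value ++ PySem.Str.join "" ((block.drop (block.findIdx (fun line => PySem.Str.startswith line "msgstr"))).map extractQuotedB)) := by
  induction block generalizing key value with
  | nil => simp [loadTransGo, PySem.Str.join, PySem.Chars.join_nil]
  | cons line rest ih =>
    by_cases h : PySem.Str.startswith line "msgstr" = true
    · have h2 := h; simp at h2
      simp only [loadTransGo, h, Bool.false_eq_true, ite_false, ite_true]
      rw [go_false]
      simp [List.findIdx_cons, h2, extB_eq, join_nil_cons, join_nil_empty, String.append_assoc]
    · have h2 : PySem.Str.startswith line "msgstr" = false := by simpa using h
      have h3 := h2; simp at h3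
      simp only [loadTransGo, h2, Bool.false_eq_true, ite_false, ite_true]
      rw [ih]
      simp [List.findIdx_cons, h3, join_nil_cons, extB_eq, String.append_assoc]

-- ===== VERDICT (by name: the statement is the Claim_ definition above) =====
theorem loadTransPair_spec : Claim_equal_loadTransPair := by
  intro block _ _
  unfold Spec_loadTransPair loadTransPair loadTransPair_alt
  rw [go_true]
  simp
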